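-- pv_equiv track=rewrite | github.com/pypi-data/pypi-mirror-45 | packages/bomail/bomail-0.9.3.8.tar.gz/bomail-0.9.3.8/bomail/util/addr.py | convert_quoted_names
-- ===== SOURCE A (Python) =====
-- def convert_quoted_names(namestr):
--   slist = []
--   old_quote_ind = -1
--   while True:
--     new_quote_ind = namestr.find('"', old_quote_ind+1)
--     if new_quote_ind == -1:
--       slist.append(namestr[old_quote_ind+1:])
--       break
--     next_ind = namestr.find('"', new_quote_ind+1)
--     if next_ind == -1:
--       slist.append(namestr[old_quote_ind+1:])
--       break
--     # everything between last quoted sequence and this one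
--     slist.append(namestr[old_quote_ind+1: new_quote_ind])
--     name = namestr[new_quote_ind+1:next_ind]
--     if "," in name:
--       namelist = [r.strip() for r in name.split(",")]
--       namelist.reverse()
--       name = ' '.join(namelist)
--     slist.append(name)
--     old_quote_ind = next_ind
--   return ''.join(slist)
-- ===== SOURCE B (Python) =====
-- def convert_quoted_names(namestr):
--   # Split on '"' once, then rebuild the pieces two at a time:
--   # text outside quotes is kept, each quoted "Last, First" becomes "First Last",
--   # and a dangling unmatched quote is reattached verbatim.
--   def fix(name):
--     if ',' in name:
--       return ' '.join([r.strip() for r in name.split(',')][::-1])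
--     return name
--   def rebuild(ps):
--     if len(ps) <= 1:
--       return ps
--     if len(ps) == 2:
--       return [ps[0], '"' + ps[1]]
--     return [ps[0], fix(ps[1])] + rebuild(ps[2:])
--   return ''.join(rebuild(namestr.split('"')))
-- ===== Notes on version B (the rewrite author's own statement) =====
-- stated objective: idiomatic
-- what changed: B splits the string on '"' once and rebuilds the pieces two at a time by structural recursion (transforming each complete quoted name, reattaching a dangling unmatched quote verbatim), instead of A's index-state while-loop with repeated str.find and slicing.
import Mathlib
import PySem

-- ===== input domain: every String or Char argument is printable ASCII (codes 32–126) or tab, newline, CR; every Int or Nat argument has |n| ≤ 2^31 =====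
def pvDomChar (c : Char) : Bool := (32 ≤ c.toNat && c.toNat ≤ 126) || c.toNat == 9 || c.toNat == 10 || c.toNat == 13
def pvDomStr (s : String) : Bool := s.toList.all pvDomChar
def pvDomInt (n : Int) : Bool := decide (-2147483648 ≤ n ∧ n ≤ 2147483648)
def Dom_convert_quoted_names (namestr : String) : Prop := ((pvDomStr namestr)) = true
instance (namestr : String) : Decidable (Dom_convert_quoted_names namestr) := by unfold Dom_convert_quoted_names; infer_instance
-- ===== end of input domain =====

-- B splits on '"' once and rebuilds the pieces two at a time by recursion, instead of A's
-- index-state while-loop with repeated find and slicing; same return value (idiomatic rewrite).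

-- ===== PORT A =====
-- the ', ' name transform shared verbatim by both Pythons ('Last, First' -> 'First Last')
def pvFixName (name : String) : String :=
  if PySem.Str.isIn "," name then
    PySem.Str.join " " ((((PySem.Str.split? name ",").getD []).map PySem.Str.strip).reverse)
  else name

-- A's while-loop; fuel = len+1 only makes the recursion total (old_quote_ind grows each round)
def pvLoopA (namestr : String) : Nat → Int → List String → List String
  | 0, _, slist => slist
  | fuel+1, old, slist =>
    let new := PySem.Str.findFrom namestr "\"" (old+1)
    if new = -1 then slist ++ [PySem.Str.slice namestr (some (old+1)) none]
    else
      let next := PySem.Str.findFrom namestr "\"" (new+1)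
      if next = -1 then slist ++ [PySem.Str.slice namestr (some (old+1)) none]
      else pvLoopA namestr fuel next
        (slist ++ [PySem.Str.slice namestr (some (old+1)) (some new),
                   pvFixName (PySem.Str.slice namestr (some (new+1)) (some next))])

def convert_quoted_names (namestr : String) : String :=
  PySem.Str.join "" (pvLoopA namestr ((PySem.Str.len namestr).toNat + 1) (-1) [])

-- ===== PORT B =====
def pvRebuild (ps : List String) : List String :=
  match ps with
  | [] => []
  | [p] => [p]
  | [p, q] => [p, "\"" ++ q]
  | p :: q :: r :: rs => p :: pvFixName q :: pvRebuild (r :: rs)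

def convert_quoted_names_alt (namestr : String) : String :=
  -- split? is `some` here because the separator "\"" is nonempty
  PySem.Str.join "" (pvRebuild ((PySem.Str.split? namestr "\"").getD []))

-- ===== PRECONDITION & SPEC =====
def Spec_convert_quoted_names (namestr : String) (out : String) : Prop := out = convert_quoted_names_alt namestr
instance (namestr : String) (out : String) : Decidable (Spec_convert_quoted_names namestr out) := by unfold Spec_convert_quoted_names; infer_instance

-- ===== CLAIM (what is proved, stated in full; the proofs are below) =====
def Claim_equal_convert_quoted_names : Prop := ∀ (namestr : String), Dom_convert_quoted_names namestr → Spec_convert_quoted_names namestr (convert_quoted_names namestr)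

-- ===== LEMMAS AND PROOFS =====

-- Chars-level mirror of pvFixName
def pvFixChars (name : List Char) : List Char :=
  if PySem.Chars.isIn [','] name then
    PySem.Chars.join [' '] (((PySem.Chars.splitOn name [',']).map PySem.Chars.strip).reverse)
  else name

-- Chars-level mirror of pvRebuild
def pvProcParts : List (List Char) → List (List Char)
  | [] => []
  | [p] => [p]
  | [p, q] => [p, '"' :: q]
  | p :: q :: r :: rs => p :: pvFixChars q :: pvProcParts (r :: rs)

theorem pv_split?_some (s : String) (sep : String) (hsep : sep.toList ≠ []) :
    ∃ parts, PySem.Str.split? s sep = some parts ∧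
      parts.map String.toList = PySem.Chars.splitOn s.toList sep.toList := by
  have hmap := PySem.Str.split?_map s sep
  unfold PySem.Chars.split? at hmap
  rw [if_neg (by simpa using hsep)] at hmap
  cases hsp : PySem.Str.split? s sep with
  | none => rw [hsp] at hmap; simp at hmap
  | some parts =>
    rw [hsp] at hmap
    simp only [Option.map_some, Option.some_inj] at hmap
    exact ⟨parts, rfl, hmap⟩

theorem pv_toList_fix (s : String) : (pvFixName s).toList = pvFixChars s.toList := by
  obtain ⟨parts, hsp, hmap⟩ := pv_split?_some s "," (by decide)
  have hcl : ",".toList = [','] := by decide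
  rw [hcl] at hmap
  unfold pvFixName pvFixChars
  by_cases hin : PySem.Str.isIn "," s = true
  · have hin' : PySem.Chars.isIn [','] s.toList = true := by
      rw [← hcl, ← PySem.Str.isIn_eq]; exact hin
    simp only [hin, hin', if_true, hsp, Option.getD_some]
    rw [PySem.Str.toList_join]
    have hsl : " ".toList = [' '] := by decide
    rw [hsl, ← hmap]
    simp [List.map_reverse, List.map_map, Function.comp_def, PySem.Str.toList_strip]
  · have hin' : ¬ PySem.Chars.isIn [','] s.toList = true := by
      rw [← hcl, ← PySem.Str.isIn_eq]; exact hin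
    simp [hin']

theorem pv_rebuild_map (ps : List String) :
    (pvRebuild ps).map String.toList = pvProcParts (ps.map String.toList) := by
  induction ps using pvRebuild.induct with
  | case1 => simp [pvRebuild, pvProcParts]
  | case2 p => simp [pvRebuild, pvProcParts]
  | case3 p q => simp [pvRebuild, pvProcParts]
  | case4 p q r rs ih => simp [pvRebuild, pvProcParts, ih, pv_toList_fix]

theorem pv_go_acc (c : Char) (fuel : Nat) : ∀ (l cur : List Char) (acc : List (List Char)),
    PySem.Chars.splitOn.go [c] fuel l cur acc =
      acc.reverse ++ PySem.Chars.splitOn.go [c] fuel l cur [] := by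
  induction fuel with
  | zero => intro l cur acc; simp [PySem.Chars.splitOn.go]
  | succ f ih =>
    intro l cur acc
    cases l with
    | nil => simp [PySem.Chars.splitOn.go]
    | cons a rest =>
      simp only [PySem.Chars.splitOn.go]
      by_cases hp : List.isPrefixOf [c] (a :: rest) = true
      · simp only [hp, if_true]
        rw [ih _ _ (cur.reverse :: acc), ih _ _ [cur.reverse]]
        simp
      · simp only [hp, if_false, Bool.false_eq_true]
        exact ih _ _ _

theorem pv_go_no (c : Char) (l : List Char) (h : c ∉ l) : ∀ (fuel : Nat) (cur : List Char)
    (acc : List (List Char)),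
    PySem.Chars.splitOn.go [c] fuel l cur acc = ((cur.reverse ++ l) :: acc).reverse := by
  induction l with
  | nil =>
    intro fuel cur acc
    cases fuel <;> simp [PySem.Chars.splitOn.go]
  | cons a rest ih =>
    intro fuel cur acc
    have hne : ¬ (c = a) := fun hc => h (hc ▸ List.mem_cons_self)
    cases fuel with
    | zero => simp [PySem.Chars.splitOn.go]
    | succ f =>
      have hp : List.isPrefixOf [c] (a :: rest) = false := by
        simp [List.isPrefixOf, hne]
      simp only [PySem.Chars.splitOn.go, hp, Bool.false_eq_true, if_false]
      rw [ih (fun hm => h (List.mem_cons_of_mem a hm)) f (a :: cur) acc]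
      simp

theorem pv_go_cons (c : Char) (rest : List Char) : ∀ (pre : List Char), c ∉ pre → ∀ (fuel : Nat)
    (cur : List Char) (acc : List (List Char)),
    PySem.Chars.splitOn.go [c] (fuel + pre.length + 1) (pre ++ c :: rest) cur acc =
      PySem.Chars.splitOn.go [c] fuel rest [] ((cur.reverse ++ pre) :: acc) := by
  intro pre
  induction pre with
  | nil =>
    intro _ fuel cur acc
    have hp : List.isPrefixOf [c] (c :: rest) = true := by simp [List.isPrefixOf]
    simp [PySem.Chars.splitOn.go, hp]
  | cons a pre' ih =>
    intro h fuel cur acc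
    have hne : ¬ (c = a) := fun hc => h (hc ▸ List.mem_cons_self)
    have hp : List.isPrefixOf [c] (a :: (pre' ++ c :: rest)) = false := by
      simp [List.isPrefixOf, hne]
    have harith : fuel + (a :: pre').length + 1 = (fuel + pre'.length + 1) + 1 := by
      simp; omega
    rw [harith]
    simp only [List.cons_append, PySem.Chars.splitOn.go, hp, Bool.false_eq_true, if_false]
    rw [ih (fun hm => h (List.mem_cons_of_mem a hm)) fuel (a :: cur) acc]
    simp

theorem pv_splitOn_no (c : Char) (l : List Char) (h : c ∉ l) :
    PySem.Chars.splitOn l [c] = [l] := by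
  unfold PySem.Chars.splitOn
  rw [pv_go_no c l h]
  simp

theorem pv_splitOn_cons (c : Char) (pre rest : List Char) (h : c ∉ pre) :
    PySem.Chars.splitOn (pre ++ c :: rest) [c] = pre :: PySem.Chars.splitOn rest [c] := by
  unfold PySem.Chars.splitOn
  have hlen : (pre ++ c :: rest).length + 1 = (rest.length + 1) + pre.length + 1 := by
    simp; omega
  rw [hlen, pv_go_cons c rest pre h (rest.length + 1) [] [], pv_go_acc]
  simp

theorem pv_go_ne_nil (c : Char) (fuel : Nat) : ∀ (l cur : List Char) (acc : List (List Char)),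
    PySem.Chars.splitOn.go [c] fuel l cur acc ≠ [] := by
  induction fuel with
  | zero => intro l cur acc; simp [PySem.Chars.splitOn.go]
  | succ f ih =>
    intro l cur acc
    cases l with
    | nil => simp [PySem.Chars.splitOn.go]
    | cons a rest =>
      simp only [PySem.Chars.splitOn.go]
      by_cases hp : List.isPrefixOf [c] (a :: rest) = true
      · simp only [hp, if_true]; exact ih _ _ _
      · simp only [hp, Bool.false_eq_true, if_false]; exact ih _ _ _

theorem pv_splitOn_ne_nil (c : Char) (l : List Char) : PySem.Chars.splitOn l [c] ≠ [] :=
  pv_go_ne_nil c _ l [] []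

theorem pv_procParts_cons2 (p q : List Char) (tail : List (List Char)) (h : tail ≠ []) :
    pvProcParts (p :: q :: tail) = p :: pvFixChars q :: pvProcParts tail := by
  cases tail with
  | nil => exact absurd rfl h
  | cons r rs => rfl

theorem pv_join_nil_flatten (l : List (List Char)) : PySem.Chars.join [] l = l.flatten := by
  induction l with
  | nil => simp [PySem.Chars.join, List.intercalate]
  | cons x xs ih =>
    cases xs with
    | nil => simp [PySem.Chars.join, List.intercalate]
    | cons y ys => rw [PySem.Chars.join_cons_cons]; simp_all

theorem pv_mem_of_infix_singleton (c : Char) (l : List Char) (h : c ∈ l) : [c] <:+: l := by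
  obtain ⟨s, t, rfl⟩ := List.append_of_mem h
  exact ⟨s, t, by simp⟩

theorem pv_find_neg (c : Char) (d : List Char) (h : PySem.Chars.find d [c] = -1) : c ∉ d :=
  fun hm => (PySem.Chars.find_eq_neg_one_iff d [c]).mp h (pv_mem_of_infix_singleton c d hm)

theorem pv_find_decomp (c : Char) (d : List Char) (n : Nat)
    (h : PySem.Chars.find d [c] = (n : Int)) :
    n < d.length ∧ c ∉ d.take n ∧ d = d.take n ++ c :: d.drop (n+1) := by
  have hff : PySem.Chars.findFrom d [c] ((0 : Nat) : Int) = (n : Int) := by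
    simpa [PySem.Chars.findFrom_zero] using h
  have hne : PySem.Chars.findFrom d [c] ((0 : Nat) : Int) ≠ -1 := by
    rw [hff]; omega
  obtain ⟨-, hpre, hmin⟩ := PySem.Chars.findFrom_natCast_spec d [c] 0 (Nat.zero_le _) hne
  rw [hff] at hpre hmin
  simp only [Int.toNat_natCast] at hpre hmin
  obtain ⟨t, ht⟩ := hpre
  have hdn : d.drop n = c :: d.drop (n+1) := by
    have h1 : d.drop n = c :: t := by simpa using ht.symm
    have h2 : d.drop (n+1) = (d.drop n).tail := by
      rw [← List.tail_drop]
    rw [h1] at h2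
    simp at h2
    rw [h1, h2]
  have hlen : n < d.length := by
    by_contra hlt
    rw [List.drop_eq_nil_of_le (by omega)] at hdn
    simp at hdn
  refine ⟨hlen, ?_, ?_⟩
  · intro hmem
    obtain ⟨i, hi, hget⟩ := List.getElem_of_mem hmem
    have hin : i < n := by
      have := hi
      simp [List.length_take] at this
      omega
    have hilen : i < d.length := by omega
    have hdi : d[i] = c := by
      rw [List.getElem_take] at hget
      exact hget
    have hp : [c] <+: d.drop i := by
      rw [List.drop_eq_getElem_cons hilen, hdi]
      exact ⟨d.drop (i+1), rfl⟩
    exact hmin i (Nat.zero_le _) hin hp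
  · conv_lhs => rw [← List.take_append_drop n d]
    rw [hdn]

theorem pv_loopA_join (s : String) : ∀ (fuel k : Nat) (slist : List String),
    k ≤ s.toList.length → s.toList.length - k < fuel →
    ((pvLoopA s fuel ((k : Int) - 1) slist).map String.toList).flatten =
      (slist.map String.toList).flatten ++
        (pvProcParts (PySem.Chars.splitOn (s.toList.drop k) ['"'])).flatten := by
  intro fuel
  induction fuel with
  | zero => intro k slist hk hf; omega
  | succ f ih =>
    intro k slist hk hf
    have hq : ("\"" : String).toList = ['"'] := by decide
    simp only [pvLoopA]
    have e1 : (k : Int) - 1 + 1 = (k : Int) := by ring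
    rw [e1]
    rw [PySem.Str.findFrom_eq, hq,
        PySem.Chars.findFrom_natCast s.toList ['"'] k hk]
    by_cases hneg : PySem.Chars.find (s.toList.drop k) ['"'] = -1
    · -- find = -1 : no quote in the rest
      have hnot : ('"' : Char) ∉ s.toList.drop k := pv_find_neg _ _ hneg
      rw [hneg]
      norm_num
      rw [pv_splitOn_no _ _ hnot]
      simp [pvProcParts]
    · -- find = n ≥ 0 : first quote at position k+n
      have h0 : 0 ≤ PySem.Chars.find (s.toList.drop k) ['"'] := by
        have := PySem.Chars.neg_one_le_find (s.toList.drop k) ['"']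
        omega
      obtain ⟨n, hfind'⟩ : ∃ n : Nat, PySem.Chars.find (s.toList.drop k) ['"'] = (n : Int) :=
        ⟨_, (Int.toNat_of_nonneg h0).symm⟩
      obtain ⟨hnlt, hnpre, hdecomp⟩ := pv_find_decomp '"' (s.toList.drop k) n hfind'
      have hdlen : (s.toList.drop k).length = s.toList.length - k := by simp
      have hkn1 : k + n + 1 ≤ s.toList.length := by omega
      rw [hfind']
      have c1 : ¬ ((n : Int) = -1) := by omega
      have c2 : ¬ ((k : Int) + (n : Int) = -1) := by omega
      simp only [if_neg c1, if_neg c2]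
      have e2 : (k : Int) + (n : Int) + 1 = ((k + n + 1 : Nat) : Int) := by push_cast; ring
      rw [e2, PySem.Str.findFrom_eq, hq,
          PySem.Chars.findFrom_natCast s.toList ['"'] (k+n+1) hkn1]
      have hdd : s.toList.drop (k+n+1) = (s.toList.drop k).drop (n+1) := by
        rw [List.drop_drop, Nat.add_assoc]
      by_cases hneg2 : PySem.Chars.find (s.toList.drop (k+n+1)) ['"'] = -1
      · -- second find = -1 : dangling quote, whole rest appended verbatim
        have hnot2 : ('"' : Char) ∉ s.toList.drop (k+n+1) := pv_find_neg _ _ hneg2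
        rw [hneg2]
        norm_num
        have hsplit : PySem.Chars.splitOn (s.toList.drop k) ['"'] =
            (s.toList.drop k).take n :: [(s.toList.drop k).drop (n+1)] := by
          conv_lhs => rw [hdecomp]
          rw [pv_splitOn_cons _ _ _ hnpre,
              pv_splitOn_no _ _ (by rw [← hdd]; exact hnot2)]
        rw [hsplit]
        simp only [pvProcParts]
        simp
        conv_lhs => rw [hdecomp]
        simp
      · -- second quote at k+n+1+m : one complete quoted name, recurse
        have h02 : 0 ≤ PySem.Chars.find (s.toList.drop (k+n+1)) ['"'] := by
          have := PySem.Chars.neg_one_le_find (s.toList.drop (k+n+1)) ['"']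
          omega
        obtain ⟨m, hfind2'⟩ : ∃ m : Nat,
            PySem.Chars.find (s.toList.drop (k+n+1)) ['"'] = (m : Int) :=
          ⟨_, (Int.toNat_of_nonneg h02).symm⟩
        obtain ⟨hmlt, hmpre, hdecomp2⟩ := pv_find_decomp '"' (s.toList.drop (k+n+1)) m hfind2'
        have hd2len : (s.toList.drop (k+n+1)).length = s.toList.length - (k+n+1) := by simp
        rw [hfind2']
        have c3 : ¬ ((m : Int) = -1) := by omega
        have c4 : ¬ (((k + n + 1 : Nat) : Int) + (m : Int) = -1) := by
          push_cast; omega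
        simp only [if_neg c3, if_neg c4]
        set k2 := k + n + 1 + m + 1 with hk2
        have e3 : ((k + n + 1 : Nat) : Int) + (m : Int) = (k2 : Int) - 1 := by
          omega
        rw [e3]
        have hk2le : k2 ≤ s.toList.length := by omega
        rw [ih k2 _ hk2le (by omega)]
        have hdd2 : (s.toList.drop (k+n+1)).drop (m+1) = s.toList.drop k2 := by
          rw [List.drop_drop, show (k+n+1) + (m+1) = k2 from by omega]
        have hsplit : PySem.Chars.splitOn (s.toList.drop k) ['"'] =
            (s.toList.drop k).take n :: (s.toList.drop (k+n+1)).take m ::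
              PySem.Chars.splitOn (s.toList.drop k2) ['"'] := by
          conv_lhs => rw [hdecomp]
          rw [pv_splitOn_cons _ _ _ hnpre]
          congr 1
          rw [← hdd]
          conv_lhs => rw [hdecomp2]
          rw [pv_splitOn_cons _ _ _ hmpre, hdd2]
        rw [hsplit, pv_procParts_cons2 _ _ _ (pv_splitOn_ne_nil _ _)]
        have hA' : (PySem.Str.slice s (some ((k : Int))) (some ((k : Int) + (n : Int)))).toList =
            (s.toList.drop k).take n := by
          rw [PySem.Str.toList_slice]
          simpa using PySem.List.slice_natCast_add s.toList k n
        have hB' : (PySem.Str.slice s (some ((k : Int) + (n : Int) + 1))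
              (some ((k2 : Int) - 1))).toList =
            (s.toList.drop (k+n+1)).take m := by
          rw [show (k : Int) + (n : Int) + 1 = ((k + n + 1 : Nat) : Int) from by push_cast; ring,
              ← e3, PySem.Str.toList_slice]
          simpa using PySem.List.slice_natCast_add s.toList (k+n+1) m
        have hB2 : PySem.List.slice s.toList (some ((k : Int) + (n : Int) + 1))
              (some ((k2 : Int) - 1)) = (s.toList.drop (k+n+1)).take m := by
          simpa [PySem.Str.toList_slice] using hB'
        simp only [List.map_append, List.map_cons, List.map_nil, List.flatten_append,
          List.flatten_cons, List.flatten_nil, List.append_nil, pv_toList_fix, hA']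
        simp [hB2]

-- ===== VERDICT (by name: the statement is the Claim_ definition above) =====
theorem convert_quoted_names_spec : Claim_equal_convert_quoted_names := by
  intro s _
  unfold Spec_convert_quoted_names convert_quoted_names convert_quoted_names_alt
  obtain ⟨parts, hsp, hmap⟩ := pv_split?_some s "\"" (by decide)
  have hq : ("\"" : String).toList = ['"'] := by decide
  rw [hq] at hmap
  have hA := pv_loopA_join s ((PySem.Str.len s).toNat + 1) 0 []
    (Nat.zero_le _) (by simp [PySem.Str.len_eq])
  apply String.ext
  show (PySem.Str.join "" _).toList = (PySem.Str.join "" _).toList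
  rw [PySem.Str.toList_join, PySem.Str.toList_join]
  have hnil : ("" : String).toList = [] := by decide
  rw [hnil, pv_join_nil_flatten, pv_join_nil_flatten]
  rw [hsp]
  simp only [Option.getD_some]
  rw [pv_rebuild_map, hmap]
  have : ((0 : Nat) : Int) - 1 = -1 := by norm_num
  rw [← this]
  rw [hA]
  simp
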